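-- pv_equiv track=rewrite | github.com/stone-technologies/ACL_budget_paper | full_budgeter_pubmedqa.py | lead_selector
-- ===== SOURCE A (Python) =====
-- def wc(x):
--     return len(x.split()) if isinstance(x, str) else 0
--
-- def lead_selector(units, B):
--     out, L = [], 0
--     for u in units:
--         lu = wc(u)
--         if L + lu <= B:
--             out.append(u)
--             L += lu
--         else:
--             break
--     return " ".join(out)
-- ===== SOURCE B (Python) =====
-- def lead_selector(units, B):
--     # table build: prefix sums of word counts, then a boundary search, then slice+join
--     sums = []
--     t = 0
--     for u in units:
--         t += len(u.split())
--         sums.append(t)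
--     k = 0
--     while k < len(sums) and sums[k] <= B:
--         k += 1
--     return " ".join(units[:k])
-- ===== Notes on version B (the rewrite author's own statement) =====
-- stated objective: alternative
-- what changed: Replaces the accumulate-and-break greedy loop with a table-then-boundary decomposition: build the full prefix-sum table of word counts, scan it for the first sum exceeding B to get k, and join units[:k].
import Mathlib
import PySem

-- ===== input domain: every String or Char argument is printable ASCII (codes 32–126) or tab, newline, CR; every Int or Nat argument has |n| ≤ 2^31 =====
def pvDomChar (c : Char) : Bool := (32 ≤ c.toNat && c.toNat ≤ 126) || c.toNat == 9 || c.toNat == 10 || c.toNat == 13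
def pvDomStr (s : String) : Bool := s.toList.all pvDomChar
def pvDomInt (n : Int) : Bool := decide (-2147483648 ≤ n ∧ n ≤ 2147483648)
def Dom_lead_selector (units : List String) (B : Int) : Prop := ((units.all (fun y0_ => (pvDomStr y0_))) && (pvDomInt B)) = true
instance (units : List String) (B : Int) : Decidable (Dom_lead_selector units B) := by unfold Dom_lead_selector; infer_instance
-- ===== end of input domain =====

-- ===== PORT A =====
-- B changes only the decomposition (prefix-sum table + boundary search vs break-loop); same cost.
-- wc(u) for a string argument: len(u.split())
def pvWc (u : String) : Int := ((PySem.Str.split₀ u).length : Int)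

-- the for/break loop of A, carrying (out, L)
def pvLeadLoop (units : List String) (B : Int) (out : List String) (L : Int) : List String :=
  match units with
  | [] => out
  | u :: rest =>
    let lu := pvWc u
    if L + lu ≤ B then pvLeadLoop rest B (out ++ [u]) (L + lu)
    else out

def lead_selector (units : List String) (B : Int) : String :=
  PySem.Str.join " " (pvLeadLoop units B [] 0)

-- ===== PORT B =====
-- prefix-sum table of word counts (running total t, appended list sums)
def pvSums (units : List String) (t : Int) : List Int :=
  match units with
  | [] => []
  | u :: rest =>
    let t' := t + ((PySem.Str.split₀ u).length : Int)
    t' :: pvSums rest t'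

-- while k < len(sums) and sums[k] <= B: k += 1
def pvBoundary (sums : List Int) (B : Int) : Nat :=
  match sums with
  | [] => 0
  | s :: rest => if s ≤ B then 1 + pvBoundary rest B else 0

def lead_selector_alt (units : List String) (B : Int) : String :=
  let sums := pvSums units 0
  let k := pvBoundary sums B
  PySem.Str.join " " (units.take k)

-- ===== PRECONDITION & SPEC =====
def Spec_lead_selector (units : List String) (B : Int) (out : String) : Prop := out = lead_selector_alt units B
instance (units : List String) (B : Int) (out : String) : Decidable (Spec_lead_selector units B out) := by unfold Spec_lead_selector; infer_instance

-- ===== CLAIM (what is proved, stated in full; the proofs are below) =====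
def Claim_equal_lead_selector : Prop := ∀ (units : List String) (B : Int), Dom_lead_selector units B → Spec_lead_selector units B (lead_selector units B)

-- ===== LEMMAS AND PROOFS =====
theorem pvLeadLoop_eq_take (B : Int) :
    ∀ (units : List String) (out : List String) (L : Int),
      pvLeadLoop units B out L = out ++ units.take (pvBoundary (pvSums units L) B) := by
  intro units
  induction units with
  | nil => intro out L; simp [pvLeadLoop, pvSums, pvBoundary]
  | cons u rest ih =>
    intro out L
    simp only [pvLeadLoop, pvSums, pvBoundary, pvWc]
    by_cases h : L + ((PySem.Str.split₀ u).length : Int) ≤ B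
    · rw [if_pos h, if_pos (by linarith), ih]
      rw [Nat.add_comm 1]; simp [List.take_succ_cons]
    · rw [if_neg h, if_neg (by linarith)]
      simp

-- ===== VERDICT (by name: the statement is the Claim_ definition above) =====
theorem lead_selector_spec : Claim_equal_lead_selector := by
  intro units B _
  unfold Spec_lead_selector lead_selector lead_selector_alt
  rw [pvLeadLoop_eq_take]
  simp
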